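-- pv_equiv track=rewrite | github.com/Donatooooooo/cipv | src/data/toxic_conversations.py | fix_broken_turns
-- ===== SOURCE A (Python) =====
-- def fix_broken_turns(dialogue):
--     fixed = []
--     i = 0
--     while i < len(dialogue):
--         current = dialogue[i]
--         current_text = current["text"].strip()
--
--         # Heuristic - short turn -> conversation is broken
--         if (
--             i + 1 < len(dialogue)
--             and len(current_text) < 15
--             and current["speaker"] != dialogue[i + 1]["speaker"]
--         ):
--             dialogue[i + 1]["text"] = current_text + " " + dialogue[i + 1]["text"]
--             i += 1
--         else:
--             if fixed and current["speaker"] == fixed[-1]["speaker"]: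
--                 fixed[-1]["text"] += " " + current_text
--             else:
--                 fixed.append(current)
--             i += 1
--     return fixed
-- ===== SOURCE B (Python) =====
-- def fix_broken_turns(dialogue):
--     # Pass 1: forward-merge short turns into the next (different-speaker) turn.
--     # Mutates the dialogue dicts in place, like the original.
--     kept = []
--     i = 0
--     while i < len(dialogue):
--         cur = dialogue[i]
--         ct = cur["text"].strip()
--         if i + 1 < len(dialogue) and len(ct) < 15 and cur["speaker"] != dialogue[i + 1]["speaker"]:
--             dialogue[i + 1]["text"] = ct + " " + dialogue[i + 1]["text"]
--         else:
--             kept.append(cur)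
--         i += 1
--     # Pass 2: merge consecutive same-speaker turns.
--     fixed = []
--     for cur in kept:
--         if fixed and cur["speaker"] == fixed[-1]["speaker"]:
--             fixed[-1]["text"] += " " + cur["text"].strip()
--         else:
--             fixed.append(cur)
--     return fixed
-- ===== Notes on version B (the rewrite author's own statement) =====
-- stated objective: simpler
-- what changed: A's single while-loop that interleaves forward-merging of short turns with same-speaker back-merging is split into two sequential passes: pass 1 forward-merges short different-speaker turns into the next turn, pass 2 folds consecutive same-speaker turns together.
import Mathlib
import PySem

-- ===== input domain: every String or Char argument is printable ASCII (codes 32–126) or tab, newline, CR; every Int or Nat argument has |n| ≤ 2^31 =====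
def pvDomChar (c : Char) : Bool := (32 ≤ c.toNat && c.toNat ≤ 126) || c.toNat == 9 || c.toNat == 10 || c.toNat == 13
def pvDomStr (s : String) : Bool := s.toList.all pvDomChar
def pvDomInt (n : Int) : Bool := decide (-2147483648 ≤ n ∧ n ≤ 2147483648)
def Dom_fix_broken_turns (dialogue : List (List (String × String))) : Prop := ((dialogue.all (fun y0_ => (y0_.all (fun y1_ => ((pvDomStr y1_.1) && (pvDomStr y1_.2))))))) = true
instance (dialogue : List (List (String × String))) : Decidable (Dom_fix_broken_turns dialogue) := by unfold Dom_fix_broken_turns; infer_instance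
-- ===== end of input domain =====

-- B replaces A's single interleaved while-loop by two sequential passes (forward-merge, then
-- same-speaker back-merge); objective: simpler decomposition, same cost. Both Pythons mutate the
-- dialogue dicts in place identically; the equivalence proved here is about the return value.

-- ===== PORT A =====
-- A's else branch: merge into fixed[-1] when speakers match, else append current.
def pvKeepA (fixed : List (PySem.Dict String String)) (cur : PySem.Dict String String)
    (ct : String) : List (PySem.Dict String String) :=
  match fixed.getLast? with
  | some last =>
    if cur.getD "speaker" "" = last.getD "speaker" "" then
      -- fixed[-1]["text"] += " " + current_text
      fixed.dropLast ++ [last.modify "text" "" (fun t => t ++ " " ++ ct)]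
    else fixed ++ [cur]
  | none => fixed ++ [cur]

-- A's while-loop; the loop state is (fixed, current = dialogue[i], remaining = dialogue[i+1:]).
-- Dict reads use getD with default "" — exact under Pre_ (both keys present in every turn).
def pvLoopA (fixed : List (PySem.Dict String String)) (cur : PySem.Dict String String) :
    List (PySem.Dict String String) → List (PySem.Dict String String)
  | [] => pvKeepA fixed cur (PySem.Str.strip (cur.getD "text" ""))
  | next :: rest =>
    if PySem.Str.len (PySem.Str.strip (cur.getD "text" "")) < 15 ∧
        cur.getD "speaker" "" ≠ next.getD "speaker" "" then
      -- dialogue[i+1]["text"] = current_text + " " + dialogue[i+1]["text"]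
      pvLoopA fixed
        (next.insert "text" (PySem.Str.strip (cur.getD "text" "") ++ " " ++ next.getD "text" ""))
        rest
    else
      pvLoopA (pvKeepA fixed cur (PySem.Str.strip (cur.getD "text" ""))) next rest

def fix_broken_turns (dialogue : List (List (String × String))) : List (List (String × String)) :=
  match dialogue.map PySem.Dict.ofList with
  | [] => []
  | cur :: rest => (pvLoopA [] cur rest).map PySem.Dict.items

-- ===== PORT B =====
-- Pass 1: forward-merge short different-speaker turns into the next turn, keep the rest.
def pvPass1Aux (cur : PySem.Dict String String) :
    List (PySem.Dict String String) → List (PySem.Dict String String)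
  | [] => [cur]
  | next :: rest =>
    if PySem.Str.len (PySem.Str.strip (cur.getD "text" "")) < 15 ∧
        cur.getD "speaker" "" ≠ next.getD "speaker" "" then
      pvPass1Aux
        (next.insert "text" (PySem.Str.strip (cur.getD "text" "") ++ " " ++ next.getD "text" ""))
        rest
    else cur :: pvPass1Aux next rest

def pvPass1 : List (PySem.Dict String String) → List (PySem.Dict String String)
  | [] => []
  | cur :: rest => pvPass1Aux cur rest

-- Pass 2 body: merge into the last kept turn when speakers match, else append.
def pvStep2 (fixed : List (PySem.Dict String String)) (cur : PySem.Dict String String) :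
    List (PySem.Dict String String) :=
  match fixed.getLast? with
  | some last =>
    if cur.getD "speaker" "" = last.getD "speaker" "" then
      fixed.dropLast ++
        [last.modify "text" "" (fun t => t ++ " " ++ PySem.Str.strip (cur.getD "text" ""))]
    else fixed ++ [cur]
  | none => fixed ++ [cur]

def fix_broken_turns_alt (dialogue : List (List (String × String))) :
    List (List (String × String)) :=
  ((pvPass1 (dialogue.map PySem.Dict.ofList)).foldl pvStep2 []).map PySem.Dict.items

-- ===== PRECONDITION & SPEC =====
-- Pre_ admits exactly the inputs where Python A returns: every turn dict carries both the "text"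
-- and "speaker" keys — or the dialogue is a single turn carrying at least "text", where the
-- `fixed and ...` short-circuit never reads "speaker"; everywhere else A (and B) raises KeyError.
def Pre_fix_broken_turns (dialogue : List (List (String × String))) : Prop :=
  (∀ d ∈ dialogue, (d.any (fun kv => kv.1 == "text")) = true ∧ (d.any (fun kv => kv.1 == "speaker")) = true)
  ∨ (dialogue.length = 1 ∧ ∀ d ∈ dialogue, (d.any (fun kv => kv.1 == "text")) = true)
instance (dialogue : List (List (String × String))) : Decidable (Pre_fix_broken_turns dialogue) := by
  unfold Pre_fix_broken_turns; infer_instance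

def pvWitness_fix_broken_turns : (List (List (String × String))) :=
  [[("text", "hello there, how are you today"), ("speaker", "A")],
   [("text", "fine"), ("speaker", "B")]]

def Spec_fix_broken_turns (dialogue : List (List (String × String))) (out : List (List (String × String))) : Prop := out = fix_broken_turns_alt dialogue
instance (dialogue : List (List (String × String))) (out : List (List (String × String))) : Decidable (Spec_fix_broken_turns dialogue out) := by unfold Spec_fix_broken_turns; infer_instance

-- ===== CLAIM (what is proved, stated in full; the proofs are below) =====
def Claim_equal_fix_broken_turns : Prop := ∀ (dialogue : List (List (String × String))), Dom_fix_broken_turns dialogue → Pre_fix_broken_turns dialogue → Spec_fix_broken_turns dialogue (fix_broken_turns dialogue)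

-- ===== LEMMAS AND PROOFS =====

lemma pvKeepA_eq_step2 (fixed : List (PySem.Dict String String))
    (cur : PySem.Dict String String) :
    pvKeepA fixed cur (PySem.Str.strip (cur.getD "text" "")) = pvStep2 fixed cur := rfl

-- A's interleaved loop equals pass 1 followed by the pass-2 fold, for any accumulator.
lemma pvLoopA_eq_foldl_pass1Aux (l : List (PySem.Dict String String)) :
    ∀ (cur : PySem.Dict String String) (fixed : List (PySem.Dict String String)),
      pvLoopA fixed cur l = (pvPass1Aux cur l).foldl pvStep2 fixed := by
  induction l with
  | nil =>
    intro cur fixed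
    simp only [pvLoopA, pvPass1Aux, List.foldl_cons, List.foldl_nil, pvKeepA_eq_step2]
  | cons next rest ih =>
    intro cur fixed
    by_cases hc : PySem.Str.len (PySem.Str.strip (cur.getD "text" "")) < 15 ∧
        cur.getD "speaker" "" ≠ next.getD "speaker" ""
    · simp only [pvLoopA, pvPass1Aux, if_pos hc, ih]
    · simp only [pvLoopA, pvPass1Aux, if_neg hc, List.foldl_cons, pvKeepA_eq_step2, ih]

-- ===== VERDICT (by name: the statement is the Claim_ definition above) =====
theorem fix_broken_turns_spec : Claim_equal_fix_broken_turns := by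
  intro dialogue _ _
  unfold Spec_fix_broken_turns fix_broken_turns fix_broken_turns_alt
  cases h : dialogue.map PySem.Dict.ofList with
  | nil => simp [pvPass1]
  | cons cur rest => simp only [pvPass1, pvLoopA_eq_foldl_pass1Aux]
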